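-- pv_equiv track=rewrite | github.com/kthss01/Algorithm_Study_2020 | Organizing Containers of Balls/Organizing_Containers_of_Balls.py | organizingContainers
-- ===== SOURCE A (Python) =====
-- def organizingContainers(container):
--     balls = []
--     types = []
--     n = len(container)
--
--     for i in range(n):
--         ball = type = 0
--         for j in range(n):
--             ball += container[i][j]
--             type += container[j][i]
--         balls.append(ball)
--         types.append(type)
--
--     balls.sort()
--     types.sort()
--
--     for i in range(n):
--         if balls[i] != types[i]:
--             return "Impossible"
--     return "Possible"
-- ===== SOURCE B (Python) =====
-- def organizingContainers(container):
--     n = len(container)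
--     row_sums = [sum(r[:n]) for r in container]
--     col_sums = [sum(r[i] for r in container) for i in range(n)]
--     count = {}
--     for v in row_sums:
--         count[v] = count.get(v, 0) + 1
--     for v in col_sums:
--         count[v] = count.get(v, 0) - 1
--     return "Possible" if all(c == 0 for c in count.values()) else "Impossible"
-- ===== Notes on version B (the rewrite author's own statement) =====
-- stated objective: alternative
-- what changed: Replaces A's two sorts plus elementwise comparison loop by a single signed-count dictionary: increment per row sum, decrement per column sum, answer 'Possible' iff every count is zero (multiset equality without sorting).
import Mathlib
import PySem

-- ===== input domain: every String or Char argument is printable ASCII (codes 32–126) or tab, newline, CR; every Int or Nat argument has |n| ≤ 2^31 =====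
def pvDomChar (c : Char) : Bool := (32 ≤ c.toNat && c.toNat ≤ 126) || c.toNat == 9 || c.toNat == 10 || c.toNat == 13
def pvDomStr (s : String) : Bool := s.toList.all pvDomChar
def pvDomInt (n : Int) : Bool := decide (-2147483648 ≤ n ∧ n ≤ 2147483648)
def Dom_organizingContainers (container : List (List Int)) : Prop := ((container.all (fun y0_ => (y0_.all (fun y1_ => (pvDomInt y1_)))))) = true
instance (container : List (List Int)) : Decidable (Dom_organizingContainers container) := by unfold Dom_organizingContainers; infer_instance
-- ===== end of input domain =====

-- B replaces the two sorts and the elementwise comparison loop of A by one signed-count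
-- dictionary (increment per row sum, decrement per column sum; all zero iff the multisets
-- match) — an alternative algorithm of the same quadratic cost.


-- ===== PORT A =====
-- final loop of A: for i in range(n): if balls[i] != types[i]: return "Impossible"
def aCheck (balls types : List Int) : List Int → String
  | [] => "Possible"
  | i :: rest =>
    if PySem.List.pyGetD balls i 0 ≠ PySem.List.pyGetD types i 0 then "Impossible"
    else aCheck balls types rest

def organizingContainers (container : List (List Int)) : String :=
  let n : Int := container.length
  -- the two append loops building balls/types, with the shared inner loop over j
  let bt := (PySem.List.pyRange 0 n 1).foldl (fun (bt : List Int × List Int) i =>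
    let p := (PySem.List.pyRange 0 n 1).foldl
      (fun (p : Int × Int) j =>
        (p.1 + PySem.List.pyGetD (PySem.List.pyGetD container i []) j 0,
         p.2 + PySem.List.pyGetD (PySem.List.pyGetD container j []) i 0)) (0, 0)
    (bt.1 ++ [p.1], bt.2 ++ [p.2])) ([], [])
  let balls := PySem.List.sorted bt.1 (fun x => x) false
  let types := PySem.List.sorted bt.2 (fun x => x) false
  aCheck balls types (PySem.List.pyRange 0 n 1)

-- ===== PORT B =====
def organizingContainers_alt (container : List (List Int)) : String :=
  let n := container.length
  -- r[:n] is List.take n (exact: n = len(container) is nonnegative); r[i] for i in range(n)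
  -- is in range on every admitted input (Pre_), where getD with default 0 is exact
  let rowSums := container.map (fun r => (r.take n).sum)
  let colSums := (List.range n).map (fun i => (container.map (fun r => r.getD i 0)).sum)
  let d1 := rowSums.foldl (fun d v => d.insert v (d.getD v 0 + 1)) (PySem.Dict.empty : PySem.Dict Int Int)
  let d2 := colSums.foldl (fun d v => d.insert v (d.getD v 0 - 1)) d1
  if d2.values.all (fun c => c == 0) then "Possible" else "Impossible"

-- ===== PRECONDITION & SPEC =====
-- Pre_ is exactly A's domain: both A and B raise IndexError when some row is shorter
-- than len(container).
def Pre_organizingContainers (container : List (List Int)) : Prop :=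
  ∀ r ∈ container, container.length ≤ r.length
instance (container : List (List Int)) : Decidable (Pre_organizingContainers container) := by
  unfold Pre_organizingContainers; infer_instance
def pvWitness_organizingContainers : List (List Int) := [[1, 1], [2, 0]]

def Spec_organizingContainers (container : List (List Int)) (out : String) : Prop := out = organizingContainers_alt container
instance (container : List (List Int)) (out : String) : Decidable (Spec_organizingContainers container out) := by unfold Spec_organizingContainers; infer_instance

-- ===== CLAIM (what is proved, stated in full; the proofs are below) =====
def Claim_equal_organizingContainers : Prop := ∀ (container : List (List Int)), Dom_organizingContainers container → Pre_organizingContainers container → Spec_organizingContainers container (organizingContainers container)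

-- ===== LEMMAS AND PROOFS =====

-- A's final loop returns "Possible" iff the two lists agree at every probed index
theorem aCheck_possible_iff (balls types : List Int) (l : List Int) :
    aCheck balls types l = "Possible" ↔
      ∀ i ∈ l, PySem.List.pyGetD balls i 0 = PySem.List.pyGetD types i 0 := by
  induction l with
  | nil => simp [aCheck]
  | cons i rest ih =>
    simp only [aCheck]
    split_ifs with h
    · simp [h]
    · rw [not_not] at h
      simp [h, ih]

theorem aCheck_eq_iff (balls types : List Int) (hb : balls.length = types.length) :
    aCheck balls types (PySem.List.pyRange 0 (balls.length : Int)) = "Possible" ↔ balls = types := by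
  rw [aCheck_possible_iff]
  constructor
  · intro h
    have h1 := PySem.List.map_pyGetD_pyRange_zero' balls 0
    have h2 := PySem.List.map_pyGetD_pyRange_zero' types 0
    rw [← h1, ← h2, hb]
    exact List.map_congr_left (by rw [← hb]; exact h)
  · intro h i _; rw [h]

theorem aCheck_eq_iff' (balls types : List Int) (n : Nat) (h1 : balls.length = n)
    (h2 : types.length = n) :
    aCheck balls types (PySem.List.pyRange 0 (n : Int)) = "Possible" ↔ balls = types := by
  subst h1
  exact aCheck_eq_iff _ _ h2.symm

-- signed-count fold lemmas
theorem getD_foldl_insert_sub_one (l : List Int) (d : PySem.Dict Int Int) (v : Int) :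
    (l.foldl (fun d x => d.insert x (d.getD x 0 - 1)) d).getD v 0 = d.getD v 0 - l.count v := by
  induction l generalizing d with
  | nil => simp
  | cons x rest ih =>
    simp only [List.foldl_cons, ih, PySem.Dict.getD_insert, List.count_cons]
    by_cases h : v = x <;> simp [h] <;> omega

theorem nodup_keys_foldl_insert_add (l : List Int) (d : PySem.Dict Int Int) (hd : d.keys.Nodup) :
    (l.foldl (fun d v => PySem.Dict.insert d v (PySem.Dict.getD d v 0 + 1)) d).keys.Nodup := by
  induction l generalizing d with
  | nil => exact hd
  | cons x rest ih => exact ih _ (PySem.Dict.nodup_keys_insert _ _ _ hd)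

theorem nodup_keys_foldl_insert_sub (l : List Int) (d : PySem.Dict Int Int) (hd : d.keys.Nodup) :
    (l.foldl (fun d v => PySem.Dict.insert d v (PySem.Dict.getD d v 0 - 1)) d).keys.Nodup := by
  induction l generalizing d with
  | nil => exact hd
  | cons x rest ih => exact ih _ (PySem.Dict.nodup_keys_insert _ _ _ hd)

theorem values_all_zero_iff (d : PySem.Dict Int Int) (hd : d.keys.Nodup) :
    (d.values.all (fun c => c == 0) = true) ↔ ∀ k, d.getD k 0 = 0 := by
  constructor
  · intro h k
    rw [PySem.Dict.getD_eq_get?_getD]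
    cases hv : d.get? k with
    | none => rfl
    | some v =>
      have hm := PySem.Dict.mem_items_of_get?_eq_some d hv
      have : v ∈ d.values := List.mem_map.2 ⟨(k, v), hm, rfl⟩
      have := List.all_eq_true.1 h v this
      simpa using this
  · intro h
    refine List.all_eq_true.2 ?_
    intro v hv
    obtain ⟨⟨k, w⟩, hm, rfl⟩ := List.mem_map.1 hv
    have := PySem.Dict.getD_of_mem_items d hm hd 0
    simp only [beq_iff_eq]
    rw [← this]; exact h k

-- B returns "Possible" iff row and column sums are a permutation of each other
theorem alt_possible_iff (rows cols : List Int) :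
    ((List.foldl (fun d v => PySem.Dict.insert d v (PySem.Dict.getD d v 0 - 1))
        (List.foldl (fun d v => PySem.Dict.insert d v (PySem.Dict.getD d v 0 + 1))
          (PySem.Dict.empty : PySem.Dict Int Int) rows) cols).values.all (fun c => c == 0) = true) ↔ rows.Perm cols := by
  have hnd : (List.foldl (fun d v => PySem.Dict.insert d v (PySem.Dict.getD d v 0 - 1))
      (List.foldl (fun d v => PySem.Dict.insert d v (PySem.Dict.getD d v 0 + 1))
        (PySem.Dict.empty : PySem.Dict Int Int) rows) cols).keys.Nodup := by
    exact nodup_keys_foldl_insert_sub _ _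
      (nodup_keys_foldl_insert_add _ _ PySem.Dict.nodup_keys_empty)
  rw [values_all_zero_iff _ hnd]
  rw [List.perm_iff_count]
  constructor
  · intro h a
    have := h a
    rw [getD_foldl_insert_sub_one, PySem.Dict.getD_foldl_insert_add_one] at this
    simp at this
    omega
  · intro h k
    rw [getD_foldl_insert_sub_one, PySem.Dict.getD_foldl_insert_add_one]
    simp [h k]

theorem aCheck_cases (balls types : List Int) (l : List Int) :
    aCheck balls types l = "Possible" ∨ aCheck balls types l = "Impossible" := by
  induction l with
  | nil => left; rfl
  | cons i rest ih =>
    simp only [aCheck]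
    split_ifs with h
    · right; rfl
    · exact ih

theorem foldl_pair_append (q : Int → Int × Int) (l : List Int) (a b : List Int) :
    l.foldl (fun (bt : List Int × List Int) i => (bt.1 ++ [(q i).1], bt.2 ++ [(q i).2])) (a, b)
    = (a ++ l.map (fun i => (q i).1), b ++ l.map (fun i => (q i).2)) := by
  induction l generalizing a b with
  | nil => simp
  | cons x rest ih => simp [ih]

theorem map_pyGetD_pyRange_take (xs : List Int) (n : Nat) (d : Int) (h : n ≤ xs.length) :
    (PySem.List.pyRange 0 (n : Int)).map (fun j => PySem.List.pyGetD xs j d) = xs.take n := by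
  rw [PySem.List.pyRange_zero_natCast, List.map_map]
  refine List.ext_getElem (by simpa using h) ?_
  intro k h1 h2
  simp only [List.getElem_map, List.getElem_range, Function.comp,
    PySem.List.pyGetD_natCast, List.getElem_take]
  rw [List.getD_eq_getElem]

-- balls = row sums, types = column sums, under squareness
theorem balls_types_eq (container : List (List Int))
    (hsq : ∀ r ∈ container, container.length ≤ r.length) :
    ((PySem.List.pyRange 0 (container.length : Int)).foldl (fun (bt : List Int × List Int) i =>
      let p := (PySem.List.pyRange 0 (container.length : Int)).foldl
        (fun (p : Int × Int) j =>
          (p.1 + PySem.List.pyGetD (PySem.List.pyGetD container i []) j 0,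
           p.2 + PySem.List.pyGetD (PySem.List.pyGetD container j []) i 0)) (0, 0)
      (bt.1 ++ [p.1], bt.2 ++ [p.2])) ([], [])) =
    (container.map (fun r => (r.take container.length).sum),
     (List.range container.length).map (fun j => (container.map (fun r => r.getD j 0)).sum)) := by
  refine Eq.trans (foldl_pair_append (fun i => (PySem.List.pyRange 0 (container.length : Int)).foldl
      (fun (p : Int × Int) j =>
        (p.1 + PySem.List.pyGetD (PySem.List.pyGetD container i []) j 0,
         p.2 + PySem.List.pyGetD (PySem.List.pyGetD container j []) i 0)) (0, 0)) _ [] []) ?_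
  have hinner : ∀ i : Int,
      (PySem.List.pyRange 0 (container.length : Int)).foldl
        (fun (p : Int × Int) j =>
          (p.1 + PySem.List.pyGetD (PySem.List.pyGetD container i []) j 0,
           p.2 + PySem.List.pyGetD (PySem.List.pyGetD container j []) i 0)) (0, 0)
      = ((PySem.List.pyRange 0 (container.length : Int)).foldl
          (fun b j => b + PySem.List.pyGetD (PySem.List.pyGetD container i []) j 0) 0,
         (PySem.List.pyRange 0 (container.length : Int)).foldl
          (fun t j => t + PySem.List.pyGetD (PySem.List.pyGetD container j []) i 0) 0) :=
    fun i => PySem.List.foldl_prod_mk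
      (fun b j => b + PySem.List.pyGetD (PySem.List.pyGetD container i []) j 0)
      (fun t j => t + PySem.List.pyGetD (PySem.List.pyGetD container j []) i 0) _ 0 0
  simp only [hinner, PySem.List.foldl_add, zero_add, List.nil_append]
  refine Prod.ext ?_ ?_
  · -- balls component
    show (PySem.List.pyRange 0 (container.length : Int)).map
        (fun i => ((PySem.List.pyRange 0 (container.length : Int)).map
          (fun j => PySem.List.pyGetD (PySem.List.pyGetD container i []) j 0)).sum)
      = container.map (fun r => (r.take container.length).sum)
    have step1 : ∀ i ∈ PySem.List.pyRange 0 (container.length : Int),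
        ((PySem.List.pyRange 0 (container.length : Int)).map
          (fun j => PySem.List.pyGetD (PySem.List.pyGetD container i []) j 0)).sum
        = ((PySem.List.pyGetD container i []).take container.length).sum := by
      intro i hi
      rw [PySem.List.mem_pyRange_one] at hi
      obtain ⟨h0, hn⟩ := hi
      have hk : i = ((i.toNat : Nat) : Int) := by omega
      rw [hk, PySem.List.pyGetD_natCast]
      have hklt : i.toNat < container.length := by omega
      rw [List.getD_eq_getElem container [] hklt]
      have hlen : container.length ≤ container[i.toNat].length :=
        hsq _ (List.getElem_mem hklt)
      rw [map_pyGetD_pyRange_take _ _ _ hlen]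
    rw [List.map_congr_left step1]
    have := PySem.List.map_pyGetD_pyRange_zero' container []
    calc (PySem.List.pyRange 0 (container.length : Int)).map
          (fun i => ((PySem.List.pyGetD container i []).take container.length).sum)
        = ((PySem.List.pyRange 0 (container.length : Int)).map
            (fun i => PySem.List.pyGetD container i [])).map
            (fun r => (r.take container.length).sum) := by
          rw [List.map_map]; rfl
      _ = container.map (fun r => (r.take container.length).sum) := by rw [this]
  · -- types component
    show (PySem.List.pyRange 0 (container.length : Int)).map
        (fun i => ((PySem.List.pyRange 0 (container.length : Int)).map
          (fun j => PySem.List.pyGetD (PySem.List.pyGetD container j []) i 0)).sum)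
      = (List.range container.length).map (fun j => (container.map (fun r => r.getD j 0)).sum)
    have step1 : ∀ i : Int,
        (PySem.List.pyRange 0 (container.length : Int)).map
          (fun j => PySem.List.pyGetD (PySem.List.pyGetD container j []) i 0)
        = container.map (fun r => PySem.List.pyGetD r i 0) := by
      intro i
      calc (PySem.List.pyRange 0 (container.length : Int)).map
            (fun j => PySem.List.pyGetD (PySem.List.pyGetD container j []) i 0)
          = ((PySem.List.pyRange 0 (container.length : Int)).map
              (fun j => PySem.List.pyGetD container j [])).map (fun r => PySem.List.pyGetD r i 0) := by
            rw [List.map_map]; rfl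
        _ = container.map (fun r => PySem.List.pyGetD r i 0) := by
            rw [PySem.List.map_pyGetD_pyRange_zero']
    simp only [step1]
    rw [PySem.List.pyRange_zero_natCast, List.map_map]
    refine List.map_congr_left ?_
    intro k _
    simp only [Function.comp, PySem.List.pyGetD_natCast]

-- ===== VERDICT (by name: the statement is the Claim_ definition above) =====
theorem organizingContainers_spec : Claim_equal_organizingContainers := by
  intro container _ hpre
  unfold Pre_organizingContainers at hpre
  unfold Spec_organizingContainers organizingContainers organizingContainers_alt
  simp only [balls_types_eq container hpre]
  have hlen1 : (PySem.List.sorted (container.map (fun r => (r.take container.length).sum)) (fun x => x) false).length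
      = container.length := by
    rw [PySem.List.length_sorted, List.length_map]
  have hlen2 : (PySem.List.sorted ((List.range container.length).map
      (fun j => (container.map (fun r => r.getD j 0)).sum)) (fun x => x) false).length
      = container.length := by
    rw [PySem.List.length_sorted, List.length_map, List.length_range]
  by_cases hperm : (container.map (fun r => (r.take container.length).sum)).Perm
      ((List.range container.length).map (fun j => (container.map (fun r => r.getD j 0)).sum))
  · rw [if_pos ((alt_possible_iff _ _).2 hperm)]
    exact (aCheck_eq_iff' _ _ _ hlen1 hlen2).2
      ((PySem.List.sorted_id_eq_sorted_id_iff_perm _ _).2 hperm)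
  · rw [if_neg fun h => hperm ((alt_possible_iff _ _).1 h)]
    rcases aCheck_cases (PySem.List.sorted (container.map (fun r => (r.take container.length).sum)) (fun x => x) false)
      (PySem.List.sorted ((List.range container.length).map
        (fun j => (container.map (fun r => r.getD j 0)).sum)) (fun x => x) false)
      (PySem.List.pyRange 0 (container.length : Int)) with hc | hc
    · exact absurd ((PySem.List.sorted_id_eq_sorted_id_iff_perm _ _).1
        ((aCheck_eq_iff' _ _ _ hlen1 hlen2).1 hc)) hperm
    · exact hc
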